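-- pv_equiv track=rewrite | github.com/DrPierreChang/delivery_api | route_optimisation/engine/dima.py | _get_chains
-- ===== SOURCE A (Python) =====
-- def _get_chains(locations, max_chain_length=27):
--     current_chain = []
--     for loc in locations:
--         current_chain.append(loc)
--         if len(current_chain) == max_chain_length:
--             yield current_chain
--             current_chain = [loc]
--     if len(current_chain) > 1:
--         yield current_chain
-- ===== SOURCE B (Python) =====
-- def _get_chains(locations, max_chain_length=27):
--     # One pass over computed window starts: chains are the slices
--     # locations[i:i+max_chain_length] at stride max_chain_length-1,
--     # stopping when fewer than 2 elements remain.
--     chains = []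
--     step = max_chain_length - 1
--     i = 0
--     n = len(locations)
--     while n - i > 1:
--         chains.append(locations[i:i + max_chain_length])
--         i += step
--     return chains
-- ===== Notes on version B (the rewrite author's own statement) =====
-- stated objective: simpler
-- what changed: Replaces A's element-by-element accumulate/reseed generator loop with a stride loop over computed window start indices that slices each overlapping chain directly.
-- outside the precondition, e.g. on _get_chains([1, 2], 1): A returns [[1], [1, 2]], B does not finish within the time limit; on _get_chains([1, 2], 0): A returns [[1, 2]], B does not finish within the time limit; on _get_chains([1], 1): A returns [[1]], B returns []
import Mathlib
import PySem

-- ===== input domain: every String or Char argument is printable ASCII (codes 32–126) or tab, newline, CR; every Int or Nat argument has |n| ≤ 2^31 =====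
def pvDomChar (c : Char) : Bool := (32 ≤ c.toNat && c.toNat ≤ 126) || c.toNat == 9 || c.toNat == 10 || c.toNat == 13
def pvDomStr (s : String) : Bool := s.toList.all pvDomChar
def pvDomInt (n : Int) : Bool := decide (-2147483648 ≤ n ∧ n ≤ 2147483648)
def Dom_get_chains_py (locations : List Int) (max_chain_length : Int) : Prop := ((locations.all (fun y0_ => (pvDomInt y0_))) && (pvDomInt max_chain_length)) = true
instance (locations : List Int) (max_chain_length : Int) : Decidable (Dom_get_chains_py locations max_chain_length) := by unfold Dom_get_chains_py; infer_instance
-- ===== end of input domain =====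

-- B replaces A's accumulate/reseed loop by a stride loop slicing each window directly (objective: simpler).

-- ===== PORT A =====
-- loop body of A: state = (yielded chains so far, current_chain)
def stepA (max_chain_length : Int) (st : List (List Int) × List Int) (loc : Int) : List (List Int) × List Int :=
  let cur := st.2 ++ [loc]
  if (cur.length : Int) = max_chain_length then (st.1 ++ [cur], [loc]) else (st.1, cur)

def get_chains_py (locations : List Int) (max_chain_length : Int) : List (List Int) :=
  let s := locations.foldl (stepA max_chain_length) ([], [])
  if s.2.length > 1 then s.1 ++ [s.2] else s.1

-- ===== PORT B =====
-- while-loop of Source B, recursion on a fuel counter (fuel only makes the loop total; for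
-- max_chain_length ≥ 2 the loop in Source B terminates and the fuel is never exhausted)
def altGo (max_chain_length : Int) (locations : List Int) (fuel : Nat) (i : Int) (chains : List (List Int)) : List (List Int) :=
  match fuel with
  | 0 => chains
  | fuel + 1 =>
    if (locations.length : Int) - i > 1 then
      altGo max_chain_length locations fuel (i + (max_chain_length - 1))
        (chains ++ [PySem.List.slice locations (some i) (some (i + max_chain_length))])
    else chains

def get_chains_py_alt (locations : List Int) (max_chain_length : Int) : List (List Int) :=
  altGo max_chain_length locations (locations.length + 1) 0 []

-- ===== PRECONDITION & SPEC =====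
-- Pre_ excludes max_chain_length ≤ 1 with more than one location, where B's natural
-- stride loop does not terminate (stride ≤ 0) while A's yields there (overlapping
-- singleton reseeds / the whole list as one chain longer than the maximum) are accidents
-- of its reseed loop, and the single-location case with max_chain_length == 1, where A
-- yields a singleton chain and B yields none — both arbitrary for a degenerate maximum.
def Pre_get_chains_py (locations : List Int) (max_chain_length : Int) : Prop :=
  2 ≤ max_chain_length ∨ locations = [] ∨ (locations.length = 1 ∧ max_chain_length ≠ 1)
instance (locations : List Int) (max_chain_length : Int) : Decidable (Pre_get_chains_py locations max_chain_length) := by unfold Pre_get_chains_py; infer_instance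

def pvWitness_get_chains_py : List Int × Int := ([10, 20, 30, 40, 50], 3)

def Spec_get_chains_py (locations : List Int) (max_chain_length : Int) (out : List (List Int)) : Prop := out = get_chains_py_alt locations max_chain_length
instance (locations : List Int) (max_chain_length : Int) (out : List (List Int)) : Decidable (Spec_get_chains_py locations max_chain_length out) := by unfold Spec_get_chains_py; infer_instance

-- ===== CLAIM (what is proved, stated in full; the proofs are below) =====
def Claim_equal_get_chains_py : Prop := ∀ (locations : List Int) (max_chain_length : Int), Dom_get_chains_py locations max_chain_length → Pre_get_chains_py locations max_chain_length → Spec_get_chains_py locations max_chain_length (get_chains_py locations max_chain_length)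

-- ===== LEMMAS AND PROOFS =====

-- common intermediate: the chain decomposition both programs compute (proof helper only)
def gB (max_chain_length : Int) (ls : List Int) : List (List Int) :=
  if h1 : ls.length ≤ 1 then []
  else if (ls.length : Int) ≤ max_chain_length then [ls]
  else ls.take max_chain_length.toNat :: gB max_chain_length (ls.drop (max (max_chain_length.toNat - 1) 1))
termination_by ls.length
decreasing_by
  simp only [List.length_drop]
  omega

def finishA (s : List (List Int) × List Int) : List (List Int) :=
  if s.2.length > 1 then s.1 ++ [s.2] else s.1

theorem foldA_prefix (m : Int) : ∀ (ls : List Int) (acc : List (List Int)) (cur : List Int),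
    List.foldl (stepA m) (acc, cur) ls
      = (acc ++ (List.foldl (stepA m) ([], cur) ls).1, (List.foldl (stepA m) ([], cur) ls).2) := by
  intro ls
  induction ls with
  | nil => intro acc cur; simp
  | cons l ls ih =>
    intro acc cur
    simp only [List.foldl_cons, stepA]
    by_cases h : ((cur ++ [l]).length : Int) = m
    · simp only [if_pos h, List.nil_append]
      rw [ih (acc ++ [cur ++ [l]]) [l], ih [cur ++ [l]] [l]]
      simp
    · simp only [if_neg h]
      exact ih acc (cur ++ [l])

theorem foldA_gB (m : Int) (hm : 2 ≤ m) : ∀ (ls : List Int) (cur : List Int),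
    cur ≠ [] → (cur.length : Int) < m →
    finishA (List.foldl (stepA m) ([], cur) ls) = gB m (cur ++ ls) := by
  intro ls
  induction ls with
  | nil =>
    intro cur hne hlt
    have hc : 1 ≤ cur.length := List.length_pos_of_ne_nil hne
    simp only [List.foldl_nil, finishA, List.append_nil]
    rw [gB]
    by_cases h1 : cur.length ≤ 1
    · have he : cur.length = 1 := le_antisymm h1 hc
      simp [he]
    · have h2 : 1 < cur.length := lt_of_not_ge h1
      have h3 : (cur.length : Int) ≤ m := le_of_lt hlt
      simp [h1, h2, h3]
  | cons l ls ih =>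
    intro cur hne hlt
    simp only [List.foldl_cons, stepA]
    by_cases hfull : ((cur ++ [l]).length : Int) = m
    · simp only [if_pos hfull, List.nil_append]
      rw [foldA_prefix m ls [cur ++ [l]] [l]]
      have hrec := ih [l] (by simp) (by simp; omega)
      have hfin : finishA ([cur ++ [l]] ++ (List.foldl (stepA m) ([], [l]) ls).1,
          (List.foldl (stepA m) ([], [l]) ls).2)
          = (cur ++ [l]) :: finishA (List.foldl (stepA m) ([], [l]) ls) := by
        simp only [finishA]
        split <;> simp
      rw [hfin, hrec]
      have hcl : cur.length + 1 = m.toNat := by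
        simp only [List.length_append, List.length_cons, List.length_nil] at hfull
        omega
      cases ls with
      | nil =>
        rw [gB]
        have h1 : ¬ ((cur ++ [l]).length ≤ 1) := by simp; omega
        have h2 : ((cur ++ [l]).length : Int) ≤ m := le_of_eq hfull
        conv_rhs => rw [gB]
        simp [hne, hlt]
      | cons l2 ls2 =>
        conv_rhs => rw [gB]
        have h1 : ¬ ((cur ++ l :: l2 :: ls2).length ≤ 1) := by simp; omega
        have h2 : ¬ (((cur ++ l :: l2 :: ls2).length : Int) ≤ m) := by
          push_cast
          simp only [List.length_append, List.length_cons]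
          push_cast
          omega
        rw [dif_neg h1, if_neg h2]
        have hmax : max (m.toNat - 1) 1 = cur.length := by omega
        congr 1
        · have hsplit : (cur ++ l :: l2 :: ls2) = (cur ++ [l]) ++ (l2 :: ls2) := by simp
          rw [hsplit, List.take_append_of_le_length (by simp; omega),
              List.take_of_length_le (by simp; omega)]
        · rw [hmax, List.drop_append_of_le_length (le_refl _)]
          simp [List.drop_length]
    · have hsm : ((cur ++ [l]).length : Int) < m := by
        simp only [List.length_append, List.length_cons, List.length_nil] at hfull ⊢
        omega
      simp only [if_neg hfull]
      have := ih (cur ++ [l]) (by simp) hsm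
      rw [this]
      simp

theorem altGo_gB (m : Int) (hm : 2 ≤ m) (locations : List Int) :
    ∀ (fuel : Nat) (i : Int) (chains : List (List Int)), 0 ≤ i →
    locations.length - i.toNat < fuel →
    altGo m locations fuel i chains = chains ++ gB m (locations.drop i.toNat) := by
  intro fuel
  induction fuel with
  | zero => intro i chains hi hf; omega
  | succ fuel ih =>
    intro i chains hi hf
    rw [altGo]
    have hlendrop : (locations.drop i.toNat).length = locations.length - i.toNat :=
      List.length_drop ..
    by_cases hc : (locations.length : Int) - i > 1
    · simp only [if_pos hc]
      have hiL : i.toNat < locations.length := by omega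
      have hslice : PySem.List.slice locations (some i) (some (i + m))
          = (locations.drop i.toNat).take m.toNat := by
        rw [PySem.List.slice_toNat locations hi (by omega)]
        congr 1
        omega
      have hstep : (i + (m - 1)).toNat = i.toNat + (m.toNat - 1) := by omega
      rw [ih (i + (m - 1)) _ (by omega) (by omega), hslice]
      conv_rhs => rw [gB]
      have h1 : ¬ ((locations.drop i.toNat).length ≤ 1) := by omega
      rw [dif_neg h1]
      by_cases h2 : (((locations.drop i.toNat).length : Int) ≤ m)
      · -- last chunk: the whole remainder; next iteration appends nothing
        rw [if_pos h2]
        have htake : (locations.drop i.toNat).take m.toNat = locations.drop i.toNat :=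
          List.take_of_length_le (by omega)
        have hnext : gB m (locations.drop (i + (m - 1)).toNat) = [] := by
          have hle : (locations.drop (i + (m - 1)).toNat).length ≤ 1 := by
            rw [List.length_drop]
            omega
          rw [gB]
          exact dif_pos hle
        rw [hnext, htake]
        simp
      · rw [if_neg h2]
        have hmax : max (m.toNat - 1) 1 = m.toNat - 1 := by omega
        have hdd : (locations.drop i.toNat).drop (m.toNat - 1)
            = locations.drop (i + (m - 1)).toNat := by
          rw [List.drop_drop]
          congr 1
          omega
        rw [hmax, hdd]
        simp
    · simp only [if_neg hc]
      have hg : gB m (locations.drop i.toNat) = [] := by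
        have hle : (locations.drop i.toNat).length ≤ 1 := by omega
        rw [gB]
        exact dif_pos hle
      rw [hg]
      simp

theorem get_chains_py_spec : Claim_equal_get_chains_py := by
  intro locations m _ hpre
  unfold Spec_get_chains_py get_chains_py get_chains_py_alt
  by_cases hm : 2 ≤ m
  case neg =>
    have hp : 2 ≤ m ∨ locations = [] ∨ (locations.length = 1 ∧ m ≠ 1) := hpre
    rcases hp with hp | hp | hp
    · exact absurd hp hm
    · subst hp
      simp [altGo, finishA]
    · rcases locations with _ | ⟨l, _ | ⟨l2, ls⟩⟩
      · simp at hp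
      · have hne : ¬ ((([] : List Int) ++ [l]).length : Int) = m := by
          simp
          omega
        simp only [List.foldl_cons, List.foldl_nil, stepA, if_neg hne]
        have hc : ¬ (([l] : List Int).length : Int) - 0 > 1 := by simp
        simp [altGo, finishA, hc]
      · simp at hp
  have hB := altGo_gB m hm locations (locations.length + 1) 0 [] (le_refl 0) (by omega)
  rw [hB]
  simp only [Int.toNat_zero, List.drop_zero, List.nil_append]
  cases locations with
  | nil =>
    show finishA (List.foldl (stepA m) ([], []) []) = gB m []
    rw [gB]
    simp [finishA]
  | cons l ls =>
    show finishA (List.foldl (stepA m) ([], []) (l :: ls)) = gB m (l :: ls)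
    simp only [List.foldl_cons, stepA]
    have hne : ¬ ((([] : List Int) ++ [l]).length : Int) = m := by simp; omega
    rw [if_neg hne]
    have := foldA_gB m hm ls [l] (by simp) (by simp; omega)
    simpa using this
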